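-- pv_equiv track=rewrite | github.com/Vedhanth123/DataStructures | Code/Python/hackerrank/migratorybird.py | counting_birds
-- ===== SOURCE A (Python) =====
-- def counting_birds(array):
--
--     largest = 0
--     for i in range(len(array)):
--         if(largest < array[i]):
--             largest = array[i]
--
--     # looping to find out which lowest block has largest number
--     for j in range(len(array)):
--         if(largest == array[j]):
--             return j
-- ===== SOURCE B (Python) =====
-- def counting_birds(array):
--     largest = 0
--     best = None
--     for i, v in enumerate(array):
--         if v > largest or (v == largest and best is None):
--             largest = v
--             best = i
--     return best
-- ===== Notes on version B (the rewrite author's own statement) =====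
-- stated objective: alternative
-- what changed: Fuses A's two passes (find max, then rescan for its first index) into one enumerate pass that tracks the running max and its first index together.
import Mathlib
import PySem

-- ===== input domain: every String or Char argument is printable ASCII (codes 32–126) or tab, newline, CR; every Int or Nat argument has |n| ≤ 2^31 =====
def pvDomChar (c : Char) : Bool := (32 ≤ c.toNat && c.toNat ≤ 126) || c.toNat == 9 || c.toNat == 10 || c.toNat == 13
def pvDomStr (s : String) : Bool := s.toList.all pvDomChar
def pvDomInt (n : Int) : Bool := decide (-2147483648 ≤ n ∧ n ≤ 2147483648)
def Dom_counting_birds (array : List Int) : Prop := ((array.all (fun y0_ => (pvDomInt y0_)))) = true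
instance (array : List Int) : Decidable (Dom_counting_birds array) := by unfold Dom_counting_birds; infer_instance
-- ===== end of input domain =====

-- B fuses A's two passes (max, then first index of the max) into one enumerate pass over (index, value).

-- ===== PORT A =====
-- first loop of A: largest = 0; for each element, if largest < v then largest = v
def cbLmax : List Int → Int → Int
  | [], l => l
  | v :: t, l => cbLmax t (if l < v then v else l)

-- second loop of A: return the first index j with array[j] == largest (none = Python falls off and returns None)
def cbFind : List Int → Int → Int → Option Int
  | [], _, _ => none
  | v :: t, tgt, j => if tgt = v then some j else cbFind t tgt (j + 1)

-- outside Pre_ the Python returns None (no Int); the port's value there (.getD 0) is arbitrary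
def counting_birds (array : List Int) : Int :=
  (cbFind array (cbLmax array 0) 0).getD 0

-- ===== PORT B =====
-- single pass: state (largest, best); update when v > largest, or v == largest and best is None
def cbLoop : List Int → Int → Int → Option Int → Option Int
  | [], _, _, best => best
  | v :: t, i, l, best =>
    if l < v ∨ (v = l ∧ best = none) then cbLoop t (i + 1) v (some i)
    else cbLoop t (i + 1) l best

def counting_birds_alt (array : List Int) : Int :=
  (cbLoop array 0 0 none).getD 0

-- ===== PRECONDITION & SPEC =====
-- Pre_ excludes exactly the inputs (empty or all-negative lists) on which Python A falls
-- off both loops and returns None, which is not an int.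
def Pre_counting_birds (array : List Int) : Prop := ∃ x ∈ array, 0 ≤ x
instance (array : List Int) : Decidable (Pre_counting_birds array) := by unfold Pre_counting_birds; infer_instance
def pvWitness_counting_birds : List Int := [3, -1, 3]

def Spec_counting_birds (array : List Int) (out : Int) : Prop := out = counting_birds_alt array
instance (array : List Int) (out : Int) : Decidable (Spec_counting_birds array out) := by unfold Spec_counting_birds; infer_instance

-- ===== CLAIM (what is proved, stated in full; the proofs are below) =====
def Claim_equal_counting_birds : Prop := ∀ (array : List Int), Dom_counting_birds array → Pre_counting_birds array → Spec_counting_birds array (counting_birds array)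

-- ===== LEMMAS AND PROOFS =====
theorem le_cbLmax (t : List Int) (l : Int) : l ≤ cbLmax t l := by
  induction t generalizing l with
  | nil => simp [cbLmax]
  | cons v t ih =>
    simp only [cbLmax]
    split
    · exact le_trans (le_of_lt (by assumption)) (ih v)
    · exact ih l

-- B's loop with best = some j (j = first index of the running max l so far):
-- result is j if nothing in t exceeds l, else the first index in t of the new max.
theorem cbLoop_some (t : List Int) (i l : Int) (j : Int) :
    cbLoop t i l (some j) =
      (if cbLmax t l = l then some j else cbFind t (cbLmax t l) i) := by
  induction t generalizing i l j with
  | nil => simp [cbLoop, cbLmax]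
  | cons v t ih =>
    simp only [cbLoop, cbLmax, cbFind]
    split
    · rename_i h
      have hlv : l < v := by
        rcases h with h | ⟨_, h⟩
        · exact h
        · cases h
      have h1 : cbLmax t v ≠ l := fun hh => absurd (le_cbLmax t v) (by omega)
      rw [if_pos hlv, if_neg h1, ih]
    · rename_i h
      have hlv : ¬ l < v := fun hh => h (Or.inl hh)
      rw [if_neg hlv, ih]
      by_cases hm : cbLmax t l = l
      · rw [if_pos hm, if_pos hm]
      · have hv : cbLmax t l ≠ v := by
          intro hh
          have := le_cbLmax t l
          omega
        rw [if_neg hm, if_neg hm, if_neg hv]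

-- B's loop with best = none (the running max l has not occurred yet):
-- result is the first index in t of the final max.
theorem cbLoop_none (t : List Int) (i l : Int) :
    cbLoop t i l none = cbFind t (cbLmax t l) i := by
  induction t generalizing i l with
  | nil => simp [cbLoop, cbFind]
  | cons v t ih =>
    simp only [cbLoop, cbLmax, cbFind]
    split
    · rename_i h
      by_cases hlv : l < v
      · have h1 : cbLmax t v ≠ l := fun hh => absurd (le_cbLmax t v) (by omega)
        rw [if_pos hlv, cbLoop_some]
      · have hvl : v = l := by
          rcases h with h | ⟨h, _⟩
          · exact absurd h hlv
          · exact h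
        subst hvl
        rw [if_neg hlv, cbLoop_some]
    · rename_i h
      have hlv : ¬ l < v := fun hh => h (Or.inl hh)
      have hvl : v ≠ l := fun hh => h (Or.inr ⟨hh, by trivial⟩)
      have hv : cbLmax t l ≠ v := by
        intro hh
        have := le_cbLmax t l
        omega
      rw [if_neg hlv, if_neg hv, ih]

-- ===== VERDICT (by name: the statement is the Claim_ definition above) =====
theorem counting_birds_spec : Claim_equal_counting_birds := by
  intro array _ _
  unfold Spec_counting_birds counting_birds counting_birds_alt
  rw [cbLoop_none]
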